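-- pv_equiv track=rewrite | github.com/GreenGitHuber/w2v_cnn_jinyin_vec | generate_merge_vector.py | py_vec
-- ===== SOURCE A (Python) =====
-- def py_vec(string):
-- 	vec = [0]*26
-- 	for char in string:
-- 		if char.isalpha():
-- 			loc = ord(char)- ord('a')
-- 			if loc not in range(0,26):
-- 				vec = [0 for i in range(26)]
-- 				return vec
-- 			vec[loc] = 1
-- 	return vec
-- ===== SOURCE B (Python) =====
-- def py_vec(string):
--     # validate: any alphabetic char outside 'a'..'z' forces the zero vector
--     if any(c.isalpha() and not ('a' <= c <= 'z') for c in string):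
--         return [0] * 26
--     # alphabet-driven pass: membership test per letter
--     return [1 if chr(i + 97) in string else 0 for i in range(26)]
-- ===== Notes on version B (the rewrite author's own statement) =====
-- stated objective: alternative
-- what changed: Replaced the single input-driven pass that assigns into a mutable 26-slot vector (with a mid-loop early return) by a validation scan followed by an alphabet-driven pass that builds the vector by testing each of the 26 letters for membership in the string.
import Mathlib
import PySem

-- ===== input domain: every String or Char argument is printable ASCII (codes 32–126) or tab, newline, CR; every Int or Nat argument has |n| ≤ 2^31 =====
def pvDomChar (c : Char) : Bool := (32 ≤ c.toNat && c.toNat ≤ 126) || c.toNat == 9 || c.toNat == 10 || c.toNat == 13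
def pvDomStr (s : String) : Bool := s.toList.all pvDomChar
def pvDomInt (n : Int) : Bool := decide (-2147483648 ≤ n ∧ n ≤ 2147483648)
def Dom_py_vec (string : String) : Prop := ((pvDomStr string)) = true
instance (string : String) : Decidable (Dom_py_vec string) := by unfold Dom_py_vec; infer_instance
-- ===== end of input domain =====

-- B replaces A's input-driven assign-into-vector pass (with early return) by a validation
-- scan plus an alphabet-driven membership pass over the 26 letters (alternative decomposition).

-- ===== PORT A =====
-- the loop of A: chars still to process, current vec; early return yields the fresh zero comprehension
def pyVecGo : List Char → List Int → List Int
  | [], vec => vec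
  | c :: rest, vec =>
    if PySem.Chars.isalpha c then
      let loc : Int := (c.toNat : Int) - 97
      if loc ∈ PySem.List.pyRange 0 26 1 then
        pyVecGo rest (PySem.List.pySetD vec loc 1)
      else
        (PySem.List.pyRange 0 26 1).map (fun _ => (0 : Int))
    else pyVecGo rest vec

def py_vec (string : String) : List Int :=
  pyVecGo string.toList (List.replicate 26 0)

-- ===== PORT B =====
def py_vec_alt (string : String) : List Int :=
  if string.toList.any (fun c => PySem.Chars.isalpha c && !(decide ('a' ≤ c) && decide (c ≤ 'z'))) then
    List.replicate 26 0
  else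
    (PySem.List.pyRange 0 26 1).map
      (fun i => if PySem.Chars.isIn [Char.ofNat (i + 97).toNat] string.toList then (1 : Int) else 0)

-- ===== PRECONDITION & SPEC =====
def Spec_py_vec (string : String) (out : List Int) : Prop := out = py_vec_alt string
instance (string : String) (out : List Int) : Decidable (Spec_py_vec string out) := by unfold Spec_py_vec; infer_instance

-- ===== CLAIM (what is proved, stated in full; the proofs are below) =====
def Claim_equal_py_vec : Prop := ∀ (string : String), Dom_py_vec string → Spec_py_vec string (py_vec string)

-- ===== LEMMAS AND PROOFS =====

-- the "bad" predicate of B's validation scan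
def pvBad (c : Char) : Bool := PySem.Chars.isalpha c && !(decide ('a' ≤ c) && decide (c ≤ 'z'))

theorem pvBad_iff (c : Char) :
    pvBad c = true ↔ (PySem.Chars.isalpha c = true ∧ ¬ ((c.toNat : Int) - 97 ∈ PySem.List.pyRange 0 26 1)) := by
  have ha : 'a'.val.toNat = 97 := rfl
  have hz : 'z'.val.toNat = 122 := rfl
  have hA : 'A'.val.toNat = 65 := rfl
  have hZ : 'Z'.val.toNat = 90 := rfl
  simp only [pvBad, PySem.Chars.isalpha, PySem.Chars.islower, PySem.Chars.isupper,
    PySem.List.mem_pyRange_one, Bool.and_eq_true, Bool.or_eq_true, Bool.not_eq_true',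
    Bool.and_eq_false_iff, decide_eq_true_eq, decide_eq_false_iff_not, Char.le_def,
    UInt32.le_iff_toNat_le, Char.toNat, ha, hz, hA, hZ]
  constructor
  · rintro ⟨h1, h2⟩
    refine ⟨h1, ?_⟩
    intro ⟨hb1, hb2⟩
    rcases h2 with h | h <;> omega
  · rintro ⟨h1, h2⟩
    refine ⟨h1, ?_⟩
    by_cases h : 97 ≤ c.val.toNat
    · right; intro hb; exact h2 ⟨by omega, by omega⟩
    · left; omega

-- a good alphabetic char has its offset inside range(0, 26)
theorem pvGood_alpha (c : Char) (hg : pvBad c = false) (ha : PySem.Chars.isalpha c = true) :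
    (c.toNat : Int) - 97 ∈ PySem.List.pyRange 0 26 1 := by
  by_contra h
  exact absurd ((pvBad_iff c).mpr ⟨ha, h⟩) (by simp [hg])

-- a char whose code is 97 + i (i < 26) is alphabetic
theorem pvLower_alpha (c : Char) (i : Nat) (hi : i < 26) (hc : c.toNat = i + 97) :
    PySem.Chars.isalpha c = true := by
  have ha : 'a'.val.toNat = 97 := rfl
  have hz : 'z'.val.toNat = 122 := rfl
  have hcv : c.val.toNat = i + 97 := hc
  simp only [PySem.Chars.isalpha, PySem.Chars.islower, PySem.Chars.isupper, Bool.or_eq_true,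
    Bool.and_eq_true, decide_eq_true_eq, Char.le_def, UInt32.le_iff_toNat_le, ha, hz, hcv]
  right; omega

-- if some remaining char is bad, A's loop early-returns the zero comprehension
theorem pyVecGo_bad (chars : List Char) : ∀ (vec : List Int),
    (∃ c ∈ chars, pvBad c = true) → pyVecGo chars vec = List.replicate 26 0 := by
  induction chars with
  | nil => intro vec h; simp at h
  | cons c rest ih =>
    intro vec h
    by_cases hc : pvBad c = true
    · obtain ⟨ha, hmem⟩ := (pvBad_iff c).mp hc
      simp only [pyVecGo, ha, if_true, if_neg hmem]
      decide
    · have hrest : ∃ d ∈ rest, pvBad d = true := by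
        rcases h with ⟨d, hd, hbd⟩
        rcases List.mem_cons.mp hd with hd | hd
        · exact absurd (hd ▸ hbd) hc
        · exact ⟨d, hd, hbd⟩
      by_cases ha : PySem.Chars.isalpha c = true
      · have hmem := pvGood_alpha c (by simpa using hc) ha
        simp only [pyVecGo, ha, if_true, if_pos hmem]
        exact ih _ hrest
      · simp only [pyVecGo, ha, if_false, Bool.false_eq_true]
        exact ih _ hrest

-- with no bad char, the loop preserves the length
theorem pyVecGo_good_length (chars : List Char) : ∀ (vec : List Int),
    (∀ c ∈ chars, pvBad c = false) → (pyVecGo chars vec).length = vec.length := by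
  induction chars with
  | nil => intro vec _; rfl
  | cons c rest ih =>
    intro vec h
    have hrest : ∀ d ∈ rest, pvBad d = false := fun d hd => h d (List.mem_cons_of_mem _ hd)
    by_cases ha : PySem.Chars.isalpha c = true
    · have hmem := pvGood_alpha c (h c (List.mem_cons_self)) ha
      simp only [pyVecGo, ha, if_true, if_pos hmem]
      rw [ih _ hrest, PySem.List.length_pySetD]
    · simp only [pyVecGo, ha, if_false, Bool.false_eq_true]
      exact ih _ hrest

-- with no bad char, a pointwise characterisation of the loop's result
theorem pyVecGo_good_get (chars : List Char) : ∀ (vec : List Int)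
    (h : ∀ c ∈ chars, pvBad c = false) (hlen : vec.length = 26) (i : Nat) (hi : i < 26),
    (pyVecGo chars vec)[i]'(by rw [pyVecGo_good_length _ _ h, hlen]; exact hi) =
      if (∃ c ∈ chars, c.toNat = i + 97) then 1 else vec[i]'(by omega) := by
  induction chars with
  | nil => intro vec h hlen i hi; simp [pyVecGo]
  | cons c rest ih =>
    intro vec h hlen i hi
    have hrest : ∀ d ∈ rest, pvBad d = false := fun d hd => h d (List.mem_cons_of_mem _ hd)
    by_cases ha : PySem.Chars.isalpha c = true
    · have hmem := pvGood_alpha c (h c (List.mem_cons_self)) ha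
      have hrange := (PySem.List.mem_pyRange_one).mp hmem
      have hset : PySem.List.pySetD vec ((c.toNat : Int) - 97) 1 = vec.set ((c.toNat : Int) - 97).toNat 1 :=
        PySem.List.pySetD_of_nonneg vec 1 (by omega)
      have hgo : pyVecGo (c :: rest) vec = pyVecGo rest (vec.set ((c.toNat : Int) - 97).toNat 1) := by
        simp only [pyVecGo, ha, if_true, if_pos hmem, hset]
      have hlen' : (vec.set ((c.toNat : Int) - 97).toNat 1).length = 26 := by
        rw [List.length_set]; exact hlen
      rw [List.getElem_of_eq hgo, ih _ hrest hlen' i hi]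
      by_cases hex : ∃ d ∈ rest, d.toNat = i + 97
      · rw [if_pos hex, if_pos]
        rcases hex with ⟨d, hd, hde⟩
        exact ⟨d, List.mem_cons_of_mem _ hd, hde⟩
      · rw [if_neg hex, List.getElem_set]
        by_cases hc : c.toNat = i + 97
        · rw [if_pos (by omega), if_pos ⟨c, List.mem_cons_self, hc⟩]
        · rw [if_neg (by omega), if_neg (by
            rintro ⟨d, hd, hde⟩
            rcases List.mem_cons.mp hd with hd | hd
            · exact hc (hd ▸ hde)
            · exact hex ⟨d, hd, hde⟩)]
    · have hgo : pyVecGo (c :: rest) vec = pyVecGo rest vec := by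
        simp only [pyVecGo, ha, if_false, Bool.false_eq_true]
      rw [List.getElem_of_eq hgo, ih _ hrest hlen i hi]
      by_cases hex : ∃ d ∈ rest, d.toNat = i + 97
      · rw [if_pos hex, if_pos]
        rcases hex with ⟨d, hd, hde⟩
        exact ⟨d, List.mem_cons_of_mem _ hd, hde⟩
      · rw [if_neg hex, if_neg (by
          rintro ⟨d, hd, hde⟩
          rcases List.mem_cons.mp hd with hd | hd
          · exact ha (hd ▸ pvLower_alpha d i hi hde)
          · exact hex ⟨d, hd, hde⟩)]

-- ===== VERDICT (by name: the statement is the Claim_ definition above) =====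
theorem py_vec_spec : Claim_equal_py_vec := by
  intro string _
  unfold Spec_py_vec py_vec py_vec_alt
  by_cases hb : string.toList.any pvBad = true
  · rw [if_pos (by simpa [pvBad] using hb)]
    exact pyVecGo_bad _ _ (by simpa [List.any_eq_true] using hb)
  · have hgood : ∀ c ∈ string.toList, pvBad c = false := by
      intro c hc
      by_contra h
      exact hb (List.any_eq_true.mpr ⟨c, hc, by simpa using h⟩)
    rw [if_neg (by simpa [pvBad] using hb)]
    apply List.ext_getElem
    · rw [pyVecGo_good_length _ _ hgood, List.length_replicate, List.length_map,
        PySem.List.length_pyRange_one]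
      decide
    · intro i hi1 hi2
      have hi : i < 26 := by
        rwa [pyVecGo_good_length _ _ hgood, List.length_replicate] at hi1
      rw [pyVecGo_good_get _ _ hgood (by simp) i hi]
      have hidx : i < (PySem.List.pyRange 0 26 1).length := by
        rw [PySem.List.length_pyRange_one]; exact_mod_cast hi
      rw [List.getElem_map, PySem.List.getElem_pyRange_one]
      have hnat : ((0 + (i : Int)) + 97).toNat = i + 97 := by omega
      rw [hnat]
      have hvalid : (i + 97).isValidChar := Or.inl (by omega)
      have hcn : (Char.ofNat (i + 97)).toNat = i + 97 := by
        rw [Char.toNat_ofNat, if_pos hvalid]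
      have hmem : PySem.Chars.isIn [Char.ofNat (i + 97)] string.toList = true ↔
          ∃ c ∈ string.toList, c.toNat = i + 97 := by
        rw [PySem.Chars.isIn_iff_infix, List.singleton_infix_iff]
        constructor
        · intro h; exact ⟨_, h, hcn⟩
        · rintro ⟨c, hc, hce⟩
          have hcc : c = Char.ofNat (i + 97) :=
            Char.ext (UInt32.toNat_inj.mp (by rw [show c.val.toNat = c.toNat from rfl, hce, show (Char.ofNat (i + 97)).val.toNat = (Char.ofNat (i + 97)).toNat from rfl, hcn]))
          exact hcc ▸ hc
      simp only [hmem, List.getElem_replicate]
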